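-- pv_equiv track=rewrite | github.com/radoslawrolka/Introduction_to_Computer_Science_Course | Zestaw_2/z20_d.py | common_digit
-- ===== SOURCE A (Python) =====
-- def common_digit(x, y, s):
--     D = [False] * s
--     while x != 0:
--         d = x % s
--         D[d] = [True]
--         x //= s
--     while y != 0:
--         if D[y % s]:
--             return True
--         y //= s
--     return False
-- ===== SOURCE B (Python) =====
-- def common_digit(x, y, s):
--     def digits(n):
--         ds = []
--         while n != 0:
--             ds.append(n % s)
--             n //= s
--         return sorted(ds)
--
--     def merge(a, b):
--         if not a or not b:
--             return False
--         if a[0] == b[0]: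
--             return True
--         if a[0] < b[0]:
--             return merge(a[1:], b)
--         return merge(a, b[1:])
--
--     return merge(digits(x), digits(y))
-- ===== Notes on version B (the rewrite author's own statement) =====
-- stated objective: alternative
-- what changed: B replaces A's size-s boolean table indexed by x's digits plus an early-return scan of y with an order-based algorithm: it collects both numbers' digit lists, sorts them, and detects a shared digit by a two-pointer sorted-merge comparison, so no membership table of any kind is built.
-- outside the precondition, e.g. on common_digit(3, -3, 2): A returns True, B does not finish within the time limit; on common_digit(5, 5, -3): A raises IndexError, B returns True; on common_digit(1, 1, 0): A raises ZeroDivisionError, B raises ZeroDivisionError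
import Mathlib
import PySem

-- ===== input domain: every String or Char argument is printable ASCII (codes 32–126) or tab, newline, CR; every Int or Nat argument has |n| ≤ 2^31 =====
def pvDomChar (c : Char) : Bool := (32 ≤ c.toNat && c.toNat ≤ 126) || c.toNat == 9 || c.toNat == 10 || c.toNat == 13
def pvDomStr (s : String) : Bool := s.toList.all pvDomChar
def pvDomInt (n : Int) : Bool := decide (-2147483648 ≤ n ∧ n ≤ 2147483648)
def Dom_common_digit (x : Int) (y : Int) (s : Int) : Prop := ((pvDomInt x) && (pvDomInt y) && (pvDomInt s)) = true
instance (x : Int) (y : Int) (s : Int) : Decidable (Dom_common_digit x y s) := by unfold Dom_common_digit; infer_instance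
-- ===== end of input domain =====

-- B is an alternative algorithm: sort both digit lists and detect a shared digit by a
-- two-pointer sorted-merge comparison, instead of A's size-s boolean table plus scan of y.

-- ===== PORT A =====
-- first while loop: D[x % s] = [True]; x //= s   (fuel x.natAbs+1 suffices on the admitted inputs)
def cdFill (s : Int) : Nat → Int → List Bool → List Bool
  | 0, _, D => D
  | f+1, x, D =>
    if x = 0 then D
    else cdFill s f (PySem.Int.floordiv x s) (D.set (PySem.Int.mod x s).toNat true)

-- second while loop: if D[y % s]: return True; y //= s
def cdScan (s : Int) (D : List Bool) : Nat → Int → Bool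
  | 0, _ => false
  | f+1, y =>
    if y = 0 then false
    else if D.getD (PySem.Int.mod y s).toNat false then true
    else cdScan s D f (PySem.Int.floordiv y s)

def common_digit (x : Int) (y : Int) (s : Int) : Bool :=
  cdScan s (cdFill s (x.natAbs + 1) x (List.replicate s.toNat false)) (y.natAbs + 1) y

-- ===== PORT B =====
-- digits(n): ds = []; while n: ds.append(n % s); n //= s; return sorted(ds)
def cdDigList (s : Int) : Nat → Int → List Int → List Int
  | 0, _, ds => ds
  | f+1, n, ds =>
    if n = 0 then ds
    else cdDigList s f (PySem.Int.floordiv n s) (ds ++ [PySem.Int.mod n s])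

-- merge(a, b): recursive two-pointer scan of the two sorted lists (a[1:] = tail on a cons list)
def cdMerge : List Int → List Int → Bool
  | [], _ => false
  | _, [] => false
  | a :: as', b :: bs =>
    if a = b then true
    else if a < b then cdMerge as' (b :: bs)
    else cdMerge (a :: as') bs
termination_by a b => a.length + b.length

def common_digit_alt (x : Int) (y : Int) (s : Int) : Bool :=
  cdMerge (PySem.List.sorted (cdDigList s (x.natAbs + 1) x []) (fun d => d) false)
          (PySem.List.sorted (cdDigList s (y.natAbs + 1) y []) (fun d => d) false)

-- ===== PRECONDITION & SPEC =====
-- Pre_ excludes negative x or y and bases s < 2 (except the trivial x = y = 0, where A returns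
-- False for any s): there A raises (IndexError/ZeroDivisionError) or its while loops never
-- terminate — except for accidental partial cases (e.g. s = -3) where one program returns
-- while the other diverges or raises.
def Pre_common_digit (x : Int) (y : Int) (s : Int) : Prop :=
  0 ≤ x ∧ 0 ≤ y ∧ (2 ≤ s ∨ (x = 0 ∧ y = 0))
instance (x : Int) (y : Int) (s : Int) : Decidable (Pre_common_digit x y s) := by
  unfold Pre_common_digit; infer_instance

def pvWitness_common_digit : Int × Int × Int := (12, 7, 3)

def Spec_common_digit (x : Int) (y : Int) (s : Int) (out : Bool) : Prop := out = common_digit_alt x y s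
instance (x : Int) (y : Int) (s : Int) (out : Bool) : Decidable (Spec_common_digit x y s out) := by
  unfold Spec_common_digit; infer_instance

-- ===== CLAIM (what is proved, stated in full; the proofs are below) =====
def Claim_equal_common_digit : Prop := ∀ (x : Int) (y : Int) (s : Int), Dom_common_digit x y s → Pre_common_digit x y s → Spec_common_digit x y s (common_digit x y s)

-- ===== LEMMAS AND PROOFS =====

-- list-indexing helpers for A's table updates
theorem getD_set_ne' (D : List Bool) (i j : Nat) (b d : Bool) (h : i ≠ j) :
    (D.set j b).getD i d = D.getD i d := by
  simp [List.getD]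
  rw [List.getElem?_set_ne (by omega)]

theorem getD_set_self' (D : List Bool) (j : Nat) (b d : Bool) (h : j < D.length) :
    (D.set j b).getD j d = b := by
  simp [List.getD, h]

-- the list of base-s digits produced by the shared  n % s / n //= s  loop, with explicit fuel
def digL (s : Int) : Nat → Int → List Int
  | 0, _ => []
  | f+1, n => if n = 0 then [] else PySem.Int.mod n s :: digL s f (PySem.Int.floordiv n s)

theorem digL_nonneg {s : Int} (hs : 0 < s) :
    ∀ (f : Nat) (n : Int), ∀ d ∈ digL s f n, 0 ≤ d := by
  intro f
  induction f with
  | zero => intro n d hd; simp [digL] at hd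
  | succ f ih =>
    intro n d hd
    by_cases h0 : n = 0
    · simp [digL, h0] at hd
    · simp [digL, h0] at hd
      rcases hd with h | h
      · exact h ▸ PySem.Int.mod_nonneg n hs
      · exact ih _ d h

-- B's appending digit loop accumulates exactly the digit list
theorem cdDigList_eq (s : Int) :
    ∀ (f : Nat) (n : Int) (ds : List Int), cdDigList s f n ds = ds ++ digL s f n := by
  intro f
  induction f with
  | zero => intro n ds; simp [cdDigList, digL]
  | succ f ih =>
    intro n ds
    by_cases h0 : n = 0
    · simp [cdDigList, digL, h0]
    · simp [cdDigList, digL, h0, ih]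

-- the merge scan of two ≤-sorted lists decides whether they share an element
theorem cdMerge_iff :
    ∀ (a b : List Int), a.Pairwise (· ≤ ·) → b.Pairwise (· ≤ ·) →
      (cdMerge a b = true ↔ ∃ d, d ∈ a ∧ d ∈ b) := by
  intro a b
  induction a, b using cdMerge.induct with
  | case1 b => simp [cdMerge]
  | case2 a hne =>
    intro _ _
    rw [show cdMerge a [] = false from by cases a with | nil => exact absurd rfl hne | cons h t => simp [cdMerge]]
    simp
  | case3 as b bs =>
    intro _ _
    exact iff_of_true (by simp [cdMerge]) ⟨b, by simp, by simp⟩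
  | case4 a as b bs hne hlt ih =>
    intro ha hb
    have ha' := ha.tail
    rw [show cdMerge (a :: as) (b :: bs) = cdMerge as (b :: bs) by
      simp [cdMerge, hne, hlt]]
    rw [ih ha' hb]
    constructor
    · rintro ⟨d, hd1, hd2⟩; exact ⟨d, List.mem_cons_of_mem _ hd1, hd2⟩
    · rintro ⟨d, hd1, hd2⟩
      rcases List.mem_cons.mp hd1 with rfl | hd1'
      · exfalso
        rcases List.mem_cons.mp hd2 with rfl | hd2'
        · exact hne rfl
        · have := (List.pairwise_cons.mp hb).1 d hd2'
          omega
      · exact ⟨d, hd1', hd2⟩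
  | case5 a as b bs hne hlt ih =>
    intro ha hb
    have hb' := hb.tail
    rw [show cdMerge (a :: as) (b :: bs) = cdMerge (a :: as) bs by
      simp [cdMerge, hne, hlt]]
    rw [ih ha hb']
    constructor
    · rintro ⟨d, hd1, hd2⟩; exact ⟨d, hd1, List.mem_cons_of_mem _ hd2⟩
    · rintro ⟨d, hd1, hd2⟩
      rcases List.mem_cons.mp hd2 with rfl | hd2'
      · exfalso
        rcases List.mem_cons.mp hd1 with rfl | hd1'
        · exact hne rfl
        · have := (List.pairwise_cons.mp ha).1 d hd1'
          omega
      · exact ⟨d, hd1, hd2'⟩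

-- B = true iff the two digit lists share an element
theorem alt_iff (x y s : Int) :
    common_digit_alt x y s = true ↔
      ∃ d, d ∈ digL s (x.natAbs + 1) x ∧ d ∈ digL s (y.natAbs + 1) y := by
  unfold common_digit_alt
  rw [cdDigList_eq, cdDigList_eq]
  simp only [List.nil_append]
  rw [cdMerge_iff _ _ (PySem.List.sorted_pairwise _ _) (PySem.List.sorted_pairwise _ _)]
  simp [PySem.List.mem_sorted]

-- A's table loop marks exactly the digits of x
theorem cdFill_getD {s : Int} (hs : 2 ≤ s) :
    ∀ (f : Nat) (x : Int) (D : List Bool), 0 ≤ x → D.length = s.toNat →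
      (cdFill s f x D).length = s.toNat ∧
      ∀ i : Nat, ((cdFill s f x D).getD i false = true ↔
        (D.getD i false = true ∨ (i : Int) ∈ digL s f x)) := by
  intro f
  induction f with
  | zero => intro x D hx hD; exact ⟨hD, by simp [cdFill, digL]⟩
  | succ f ih =>
    intro x D hx hD
    by_cases h0 : x = 0
    · refine ⟨by simp [cdFill, h0, hD], ?_⟩
      intro i; simp [cdFill, digL, h0]
    · have hspos : (0:Int) < s := by omega
      have hmn : 0 ≤ PySem.Int.mod x s := PySem.Int.mod_nonneg x hspos
      have hml : PySem.Int.mod x s < s := PySem.Int.mod_lt x hspos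
      have hidx : (PySem.Int.mod x s).toNat < D.length := by
        rw [hD]; omega
      have hq : 0 ≤ PySem.Int.floordiv x s := by
        rw [PySem.Int.floordiv_eq_ediv_of_pos hspos]
        exact Int.ediv_nonneg hx (le_of_lt hspos)
      have hlen : (D.set (PySem.Int.mod x s).toNat true).length = s.toNat := by
        simp [hD]
      obtain ⟨hl, hmem⟩ := ih (PySem.Int.floordiv x s) _ hq hlen
      refine ⟨by simpa [cdFill, h0] using hl, ?_⟩
      intro i
      simp only [cdFill, if_neg h0]
      rw [hmem i]
      simp only [digL, if_neg h0, List.mem_cons]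
      constructor
      · rintro (hset | hrec)
        · by_cases hi : i = (PySem.Int.mod x s).toNat
          · subst hi
            right; left
            omega
          · left
            rwa [getD_set_ne' D i _ true false hi] at hset
        · right; right; exact hrec
      · rintro (hold | heq | hrec)
        · by_cases hi : i = (PySem.Int.mod x s).toNat
          · subst hi; left
            rw [getD_set_self' D _ true false hidx]
          · left; rwa [getD_set_ne' D i _ true false hi]
        · left
          have hi : i = (PySem.Int.mod x s).toNat := by omega
          subst hi
          rw [getD_set_self' D _ true false hidx]
        · right; exact hrec

-- A's scan of y returns True iff some digit of y is marked in D
theorem cdScan_iff {s : Int} (hs : 2 ≤ s) (D : List Bool) :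
    ∀ (f : Nat) (y : Int), 0 ≤ y →
      (cdScan s D f y = true ↔ ∃ d ∈ digL s f y, D.getD d.toNat false = true) := by
  intro f
  induction f with
  | zero => intro y hy; simp [cdScan, digL]
  | succ f ih =>
    intro y hy
    by_cases h0 : y = 0
    · simp [cdScan, digL, h0]
    · have hspos : (0:Int) < s := by omega
      have hq : 0 ≤ PySem.Int.floordiv y s := by
        rw [PySem.Int.floordiv_eq_ediv_of_pos hspos]
        exact Int.ediv_nonneg hy (le_of_lt hspos)
      simp only [cdScan, digL]
      rw [if_neg h0, if_neg h0]
      by_cases hhit : D.getD (PySem.Int.mod y s).toNat false = true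
      · rw [if_pos hhit]
        exact iff_of_true rfl ⟨PySem.Int.mod y s, List.mem_cons_self, hhit⟩
      · rw [if_neg hhit, ih _ hq]
        constructor
        · rintro ⟨d, hd, hDd⟩; exact ⟨d, List.mem_cons_of_mem _ hd, hDd⟩
        · rintro ⟨d, hd, hDd⟩
          rcases List.mem_cons.mp hd with heq | hd'
          · exact absurd (heq ▸ hDd) hhit
          · exact ⟨d, hd', hDd⟩

-- the trivial admitted corner x = y = 0 (any s): both sides return false
theorem both_false_zero (s : Int) : common_digit 0 0 s = false ∧ common_digit_alt 0 0 s = false := by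
  constructor
  · simp [common_digit, cdScan]
  · simp [common_digit_alt, cdDigList, cdMerge, PySem.List.sorted]

-- ===== VERDICT (by name: the statement is the Claim_ definition above) =====
theorem common_digit_spec : Claim_equal_common_digit := by
  intro x y s _ hpre
  unfold Spec_common_digit
  obtain ⟨hx, hy, hs2 | ⟨hx0, hy0⟩⟩ := hpre
  · have hspos : (0:Int) < s := by omega
    have hrep : (List.replicate s.toNat false).length = s.toNat := by simp
    obtain ⟨_, hmem⟩ := cdFill_getD hs2 (x.natAbs + 1) x (List.replicate s.toNat false) hx hrep
    rw [Bool.eq_iff_iff]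
    rw [show common_digit x y s =
      cdScan s (cdFill s (x.natAbs + 1) x (List.replicate s.toNat false)) (y.natAbs + 1) y from rfl]
    rw [cdScan_iff hs2 _ (y.natAbs + 1) y hy, alt_iff]
    constructor
    · rintro ⟨d, hd, hDd⟩
      have hd0 : 0 ≤ d := digL_nonneg hspos _ y d hd
      have hdx : d ∈ digL s (x.natAbs + 1) x := by
        have := (hmem d.toNat).mp hDd
        rcases this with habs | hmemx
        · simp at habs
        · rwa [Int.toNat_of_nonneg hd0] at hmemx
      exact ⟨d, hdx, hd⟩
    · rintro ⟨d, hdx, hdy⟩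
      have hd0 : 0 ≤ d := digL_nonneg hspos _ x d hdx
      refine ⟨d, hdy, ?_⟩
      apply (hmem d.toNat).mpr
      right
      rwa [Int.toNat_of_nonneg hd0]
  · subst hx0; subst hy0
    rw [(both_false_zero s).1, (both_false_zero s).2]
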